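-- pv_equiv track=rewrite | github.com/amalkoodoruth/COMP598-DATASCIENCE | assignments/hw9/260831147_submission_template/src/compute_network_stats.py | get_top_total_weight
-- ===== SOURCE A (Python) =====
-- def get_top_total_weight(data):
--     info_dict = {}
--     for key, sub_dict in data.items():
--         sum = 0
--         for _,weight in sub_dict.items():
--             sum += weight
--         info_dict[key] = sum
--     sorted_list = list(info_dict.items())
--     sorted_list.sort(key=lambda x: -x[1])
--     top_total_weight = []
--     for i in range(3):
--         top_total_weight.append(sorted_list[i][0])
--     return top_total_weight
-- ===== SOURCE B (Python) =====
-- def get_top_total_weight(data):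
--     totals = {key: sum(sub.values()) for key, sub in data.items()}
--     items = list(totals.items())
--     top = []
--     for _ in range(3):
--         best = items[0]
--         for item in items[1:]:
--             if item[1] > best[1]:
--                 best = item
--         top.append(best[0])
--         items.remove(best)
--     return top
-- ===== Notes on version B (the rewrite author's own statement) =====
-- stated objective: alternative
-- what changed: Instead of fully sorting the per-key totals descending and indexing the first three, B performs three selection rounds: scan the items for the first strictly greatest total, append its key, remove it, repeat.
import Mathlib
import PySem

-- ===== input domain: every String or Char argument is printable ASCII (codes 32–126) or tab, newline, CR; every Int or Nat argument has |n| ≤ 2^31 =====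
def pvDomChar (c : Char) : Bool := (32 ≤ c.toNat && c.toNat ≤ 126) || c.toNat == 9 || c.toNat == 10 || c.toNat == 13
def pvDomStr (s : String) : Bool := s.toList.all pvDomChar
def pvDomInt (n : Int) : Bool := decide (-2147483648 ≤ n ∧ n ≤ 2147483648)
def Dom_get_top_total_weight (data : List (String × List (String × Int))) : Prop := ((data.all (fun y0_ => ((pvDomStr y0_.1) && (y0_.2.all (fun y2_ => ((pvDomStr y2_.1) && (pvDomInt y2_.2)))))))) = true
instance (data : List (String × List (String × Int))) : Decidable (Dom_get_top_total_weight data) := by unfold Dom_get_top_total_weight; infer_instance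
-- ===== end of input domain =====

-- B replaces A's full descending sort of the per-key totals by three selection scans
-- (pick the first strict maximum, remove it, repeat); objective: alternative decomposition.

-- ===== PORT A =====
def get_top_total_weight (data : List (String × List (String × Int))) : List String :=
  let info := (PySem.Dict.ofList data).items.foldl
      (fun (info : PySem.Dict String Int) kv =>
        info.insert kv.1 ((PySem.Dict.ofList kv.2).items.foldl (fun s p => s + p.2) 0))
      PySem.Dict.empty
  let sorted_list := PySem.List.sorted info.items (fun x => -x.2) false
  -- for i in range(3): append sorted_list[i][0]; IndexError (< 3 keys) is excluded by Pre_
  (PySem.List.pyRange 0 3 1).foldl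
      (fun acc i => acc ++ [(PySem.List.pyGetD sorted_list i ("", 0)).1]) []

-- ===== PORT B =====
-- three rounds of "best := items[0]; scan rest with strict >; append; remove"
-- (the [] case is Python's IndexError on fewer than 3 keys, excluded by Pre_)
def pvPick : Nat → List (String × Int) → List String → List String
  | 0, _, acc => acc
  | Nat.succ n, items, acc =>
    match items with
    | [] => acc
    | h :: t =>
      let best := t.foldl (fun b x => if x.2 > b.2 then x else b) h
      pvPick n ((PySem.List.remove? items best).getD []) (acc ++ [best.1])

def get_top_total_weight_alt (data : List (String × List (String × Int))) : List String :=
  let totals := (PySem.Dict.ofList data).items.foldl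
      (fun (d : PySem.Dict String Int) kv => d.insert kv.1 (PySem.Dict.ofList kv.2).values.sum)
      PySem.Dict.empty
  pvPick 3 totals.items []

-- ===== PRECONDITION & SPEC =====
-- Pre_ excludes exactly the inputs with fewer than 3 distinct keys, on which both Pythons raise IndexError.
def Pre_get_top_total_weight (data : List (String × List (String × Int))) : Prop :=
  3 ≤ (PySem.List.dedup (data.map Prod.fst)).length
instance (data : List (String × List (String × Int))) : Decidable (Pre_get_top_total_weight data) := by unfold Pre_get_top_total_weight; infer_instance

def pvWitness_get_top_total_weight : (List (String × List (String × Int))) :=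
  [("a", [("x", 1)]), ("b", []), ("c", [("y", 2), ("z", 3)])]

def Spec_get_top_total_weight (data : List (String × List (String × Int))) (out : List String) : Prop := out = get_top_total_weight_alt data
instance (data : List (String × List (String × Int))) (out : List String) : Decidable (Spec_get_top_total_weight data out) := by unfold Spec_get_top_total_weight; infer_instance

-- ===== CLAIM (what is proved, stated in full; the proofs are below) =====
def Claim_equal_get_top_total_weight : Prop := ∀ (data : List (String × List (String × Int))), Dom_get_top_total_weight data → Pre_get_top_total_weight data → Spec_get_top_total_weight data (get_top_total_weight data)

-- ===== LEMMAS AND PROOFS =====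

-- B's inner scan: first element of x :: t with maximal total (strict > keeps the earlier one)
def pvFm (x : String × Int) (t : List (String × Int)) : String × Int :=
  t.foldl (fun b y => if y.2 > b.2 then y else b) x

lemma pvFm_append (x : String × Int) (t : List (String × Int)) (y : String × Int) :
    pvFm x (t ++ [y]) = if y.2 > (pvFm x t).2 then y else pvFm x t := by
  simp [pvFm, List.foldl_append]

lemma pvFm_step (x y : String × Int) (t : List (String × Int)) :
    pvFm x (y :: t) = pvFm (if y.2 > x.2 then y else x) t := rfl

lemma pvFm_mem (x : String × Int) (t : List (String × Int)) : pvFm x t ∈ x :: t := by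
  induction t generalizing x with
  | nil => simp [pvFm]
  | cons y t ih =>
    rw [pvFm_step]
    rcases List.mem_cons.mp (ih (if y.2 > x.2 then y else x)) with h | h
    · rw [h]; split_ifs <;> simp
    · simp [h]

lemma pvFm_max (x : String × Int) (t : List (String × Int)) :
    ∀ z ∈ x :: t, z.2 ≤ (pvFm x t).2 := by
  induction t generalizing x with
  | nil => simp [pvFm]
  | cons y t ih =>
    intro z hz
    have h := ih (if y.2 > x.2 then y else x)
    have hhead : (if y.2 > x.2 then y else x).2 ≤ (pvFm (if y.2 > x.2 then y else x) t).2 :=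
      h _ (by simp)
    have hxle : x.2 ≤ (if y.2 > x.2 then y else x).2 := by split_ifs <;> omega
    have hyle : y.2 ≤ (if y.2 > x.2 then y else x).2 := by split_ifs <;> omega
    rw [pvFm_step]
    rcases List.mem_cons.mp hz with rfl | hz2
    · exact le_trans hxle hhead
    rcases List.mem_cons.mp hz2 with rfl | hz3
    · exact le_trans hyle hhead
    · exact h z (List.mem_cons_of_mem _ hz3)

lemma sorted_append_singleton (l : List (String × Int)) (y : String × Int) :
    PySem.List.sorted (l ++ [y]) (fun p => -p.2) false
      = PySem.List.insertBy (fun a b => decide ((fun p : String × Int => -p.2) a < (fun p : String × Int => -p.2) b)) y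
          (PySem.List.sorted l (fun p => -p.2) false) := by
  rw [PySem.List.sorted_eq_foldl_insertBy, PySem.List.sorted_eq_foldl_insertBy, List.foldl_append]
  rfl

-- head of A's stable sort by -total = B's selection result, and the tail is the sort of the rest
lemma sel_head (x : String × Int) (t : List (String × Int)) :
    PySem.List.sorted (x :: t) (fun p => -p.2) false
      = pvFm x t :: PySem.List.sorted ((x :: t).erase (pvFm x t)) (fun p => -p.2) false := by
  induction t using List.reverseRecOn generalizing x with
  | nil => simp [PySem.List.sorted, PySem.List.insertBy, pvFm]
  | append_singleton t y ih =>
    have hx : x :: (t ++ [y]) = (x :: t) ++ [y] := by simp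
    rw [hx, sorted_append_singleton, ih, pvFm_append]
    by_cases hc : y.2 > (pvFm x t).2
    · have hnotin : y ∉ x :: t := by
        intro hmem
        have := pvFm_max x t y hmem
        omega
      rw [if_pos hc]
      have herase : ((x :: t) ++ [y]).erase y = x :: t := by
        rw [List.erase_append, if_neg hnotin]
        simp
      rw [herase, ih]
      simp only [PySem.List.insertBy]
      rw [if_pos (by simp; omega)]
    · rw [if_neg hc]
      have hmem : pvFm x t ∈ x :: t := pvFm_mem x t
      have herase : ((x :: t) ++ [y]).erase (pvFm x t) = ((x :: t).erase (pvFm x t)) ++ [y] := by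
        rw [List.erase_append, if_pos hmem]
      rw [herase, sorted_append_singleton]
      simp only [PySem.List.insertBy]
      rw [if_neg (by simp; omega)]

-- the items list of the totals dict both ports build, and its length = number of distinct keys
def pvItems (data : List (String × List (String × Int))) : List (String × Int) :=
  ((PySem.Dict.ofList data).items.foldl
    (fun (d : PySem.Dict String Int) kv => d.insert kv.1 (PySem.Dict.ofList kv.2).values.sum)
    PySem.Dict.empty).items

lemma pvItems_length (data : List (String × List (String × Int))) :
    (pvItems data).length = (PySem.List.dedup (data.map Prod.fst)).length := by
  have hD : (PySem.Dict.ofList data).keys = PySem.List.dedup (data.map Prod.fst) := by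
    rw [PySem.List.dedup_eq_ofList]
    have h := PySem.Dict.keys_foldl_insert_key data (fun p => p.1) (fun _ p => p.2)
      (PySem.Dict.empty (κ := String) (ν := List (String × Int)))
    simpa [PySem.Dict.ofList, PySem.Dict.update, PySem.Dict.keys_empty, PySem.Set.update,
      PySem.Set.ofList, PySem.Set.empty] using h
  have hinfo : ((PySem.Dict.ofList data).items.foldl
      (fun (d : PySem.Dict String Int) kv => d.insert kv.1 (PySem.Dict.ofList kv.2).values.sum)
      PySem.Dict.empty).keys = (PySem.Dict.ofList data).keys := by
    have h := PySem.Dict.keys_foldl_insert_key ((PySem.Dict.ofList data).items) (fun p => p.1)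
      (fun _ kv => (PySem.Dict.ofList kv.2).values.sum) (PySem.Dict.empty (κ := String) (ν := Int))
    rw [h]
    have h2 : PySem.Set.update (PySem.Dict.empty (κ := String) (ν := Int)).keys
        ((PySem.Dict.ofList data).items.map (fun p => p.1))
        = PySem.Set.ofList ((PySem.Dict.ofList data).keys) := by
      simp [PySem.Set.update, PySem.Set.ofList, PySem.Set.empty, PySem.Dict.keys,
        PySem.Dict.empty]
    rw [h2, PySem.Set.ofList_eq_self_of_nodup _ (PySem.Dict.nodup_keys_ofList data)]
  have hk : (pvItems data).length
      = (((PySem.Dict.ofList data).items.foldl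
        (fun (d : PySem.Dict String Int) kv => d.insert kv.1 (PySem.Dict.ofList kv.2).values.sum)
        PySem.Dict.empty).keys).length := by
    simp [pvItems, PySem.Dict.keys]
  rw [hk, hinfo, hD]

-- both sides, as a function of the common totals-items list
lemma main_items (items : List (String × Int)) (h3 : 3 ≤ items.length) :
    (PySem.List.pyRange 0 3 1).foldl
      (fun acc i => acc ++ [(PySem.List.pyGetD (PySem.List.sorted items (fun x => -x.2) false) i ("", 0)).1]) []
      = pvPick 3 items [] := by
  obtain ⟨a1, r1, rfl⟩ : ∃ a r, items = a :: r := by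
    cases items with
    | nil => simp at h3
    | cons a r => exact ⟨a, r, rfl⟩
  have h3' : 2 ≤ r1.length := by simp [List.length_cons] at h3; omega
  have hmem1 : pvFm a1 r1 ∈ a1 :: r1 := pvFm_mem a1 r1
  have he1len : ((a1 :: r1).erase (pvFm a1 r1)).length = r1.length := by
    rw [List.length_erase_of_mem hmem1]; simp
  obtain ⟨a2, r2, he1⟩ : ∃ a r, (a1 :: r1).erase (pvFm a1 r1) = a :: r := by
    cases h : (a1 :: r1).erase (pvFm a1 r1) with
    | nil => rw [h] at he1len; simp at he1len; omega
    | cons a r => exact ⟨a, r, rfl⟩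
  have h2' : 1 ≤ r2.length := by
    rw [he1] at he1len; simp [List.length_cons] at he1len; omega
  have hmem2 : pvFm a2 r2 ∈ a2 :: r2 := pvFm_mem a2 r2
  have he2len : ((a2 :: r2).erase (pvFm a2 r2)).length = r2.length := by
    rw [List.length_erase_of_mem hmem2]; simp
  obtain ⟨a3, r3, he2⟩ : ∃ a r, (a2 :: r2).erase (pvFm a2 r2) = a :: r := by
    cases h : (a2 :: r2).erase (pvFm a2 r2) with
    | nil => rw [h] at he2len; simp at he2len; omega
    | cons a r => exact ⟨a, r, rfl⟩
  have hmem3 : pvFm a3 r3 ∈ a3 :: r3 := pvFm_mem a3 r3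
  -- the first three elements of the sorted list are the three selection results
  have hs : PySem.List.sorted (a1 :: r1) (fun x => -x.2) false
      = pvFm a1 r1 :: pvFm a2 r2 :: pvFm a3 r3
          :: PySem.List.sorted ((a3 :: r3).erase (pvFm a3 r3)) (fun x => -x.2) false := by
    rw [sel_head a1 r1, he1, sel_head a2 r2, he2, sel_head a3 r3]
  -- the three removals of B walk the same chain
  have hrem1 : PySem.List.remove? (a1 :: r1) (pvFm a1 r1) = some (a2 :: r2) := by
    rw [PySem.List.remove?_eq_some_erase _ _ hmem1, he1]
  have hrem2 : PySem.List.remove? (a2 :: r2) (pvFm a2 r2) = some (a3 :: r3) := by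
    rw [PySem.List.remove?_eq_some_erase _ _ hmem2, he2]
  have hrange : PySem.List.pyRange 0 3 1 = [0, 1, 2] := by decide
  rw [hrange]
  simp only [List.foldl_cons, List.foldl_nil, List.nil_append, List.cons_append, List.nil_append, hs, PySem.List.pyGetD_ofNat']
  have hf1 : r1.foldl (fun b x => if x.2 > b.2 then x else b) a1 = pvFm a1 r1 := rfl
  have hf2 : r2.foldl (fun b x => if x.2 > b.2 then x else b) a2 = pvFm a2 r2 := rfl
  have hf3 : r3.foldl (fun b x => if x.2 > b.2 then x else b) a3 = pvFm a3 r3 := rfl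
  simp only [pvPick, hf1, hrem1, Option.getD_some, hf2, hrem2, hf3]
  simp [List.getD]

theorem get_top_total_weight_spec : Claim_equal_get_top_total_weight := by
  intro data _ hpre
  unfold Pre_get_top_total_weight at hpre
  have hAB : (PySem.Dict.ofList data).items.foldl
      (fun (info : PySem.Dict String Int) kv =>
        info.insert kv.1 ((PySem.Dict.ofList kv.2).items.foldl (fun s p => s + p.2) 0))
      PySem.Dict.empty
      = (PySem.Dict.ofList data).items.foldl
      (fun (d : PySem.Dict String Int) kv => d.insert kv.1 (PySem.Dict.ofList kv.2).values.sum)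
      PySem.Dict.empty := by
    apply PySem.List.foldl_congr_mem
    intro acc kv _
    simp [PySem.List.foldl_add, PySem.Dict.values]
  have hlen : 3 ≤ (pvItems data).length := by rw [pvItems_length]; exact hpre
  simp only [Spec_get_top_total_weight, get_top_total_weight, get_top_total_weight_alt]
  rw [hAB]
  exact main_items (pvItems data) hlen
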